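-- pv_equiv track=rewrite | github.com/thealper2/codewars-solutions | 7-kyu/inttunes.py | is_tune
-- ===== SOURCE A (Python) =====
-- def is_tune(notes):
--     if not notes:
--         return False
--
--     major_scale_pattern = {0, 2, 4, 5, 7, 9, 11}
--
--     for key in range(12):
--         valid = True
--         for note in notes:
--             pitch_class = note % 12
--             relative_note = (pitch_class - key) % 12
--             if relative_note not in major_scale_pattern:
--                 valid = False
--                 break
--
--         if valid:
--             return True
--
--     return False
-- ===== SOURCE B (Python) =====
-- def is_tune(notes):
--     if not notes:
--         return False
--     scale = {0, 2, 4, 5, 7, 9, 11}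
--     candidates = set(range(12))
--     for note in notes:
--         candidates &= {(note - p) % 12 for p in scale}
--         if not candidates:
--             return False
--     return True
-- ===== Notes on version B (the rewrite author's own statement) =====
-- stated objective: alternative
-- what changed: Replaces the 12-key outer loop with a single pass over the notes that maintains a shrinking set of candidate keys (intersecting the keys each note fits), with early exit once no key survives.
import Mathlib
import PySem

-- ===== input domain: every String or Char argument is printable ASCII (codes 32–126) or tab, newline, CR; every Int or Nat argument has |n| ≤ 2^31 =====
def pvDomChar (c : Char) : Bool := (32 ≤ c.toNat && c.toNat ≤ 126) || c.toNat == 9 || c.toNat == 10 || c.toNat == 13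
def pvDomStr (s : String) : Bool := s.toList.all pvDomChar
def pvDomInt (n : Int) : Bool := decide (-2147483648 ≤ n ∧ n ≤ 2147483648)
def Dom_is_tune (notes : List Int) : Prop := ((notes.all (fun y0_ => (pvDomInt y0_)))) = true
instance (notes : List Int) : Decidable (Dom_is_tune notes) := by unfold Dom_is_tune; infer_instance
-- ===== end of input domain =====

-- B replaces A's 12-key outer loop by one pass over the notes maintaining a shrinking
-- set of candidate keys (alternative decomposition; not claimed faster).

-- ===== PORT A =====
-- literal port of A: for each key in range(12), check every note against the major scale
def is_tune (notes : List Int) : Bool :=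
  if notes.isEmpty then false
  else
    let major_scale_pattern : PySem.Set Int := PySem.Set.ofList [0, 2, 4, 5, 7, 9, 11]
    -- 'for key in range(12): … if valid: return True' = any; the inner for-with-break = all
    (PySem.List.pyRange 0 12 1).any (fun key =>
      notes.all (fun note =>
        let pitch_class := PySem.Int.mod note 12
        let relative_note := PySem.Int.mod (pitch_class - key) 12
        PySem.Set.contains major_scale_pattern relative_note))

-- ===== PORT B =====
-- the loop of Source B: intersect the candidate keys with the keys this note fits; early False
def isTuneGo (cand : PySem.Set Int) (notes : List Int) : Bool :=
  match notes with
  | [] => true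
  | note :: rest =>
    let fits : PySem.Set Int :=
      PySem.Set.ofList (([0, 2, 4, 5, 7, 9, 11] : List Int).map
        (fun p => PySem.Int.mod (note - p) 12))
    let cand' := PySem.Set.inter cand fits
    if cand'.isEmpty then false else isTuneGo cand' rest

def is_tune_alt (notes : List Int) : Bool :=
  if notes.isEmpty then false
  else isTuneGo (PySem.Set.ofList (PySem.List.pyRange 0 12 1)) notes

-- ===== PRECONDITION & SPEC =====
def Spec_is_tune (notes : List Int) (out : Bool) : Prop := out = is_tune_alt notes
instance (notes : List Int) (out : Bool) : Decidable (Spec_is_tune notes out) := by unfold Spec_is_tune; infer_instance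

-- ===== CLAIM (what is proved, stated in full; the proofs are below) =====
def Claim_equal_is_tune : Prop := ∀ (notes : List Int), Dom_is_tune notes → Spec_is_tune notes (is_tune notes)

-- ===== LEMMAS AND PROOFS =====

-- 'note fits key' as B's port tests it
def fitB (note k : Int) : Bool :=
  (([0, 2, 4, 5, 7, 9, 11] : List Int).map (fun p => PySem.Int.mod (note - p) 12)).contains k

-- 'note fits key' as A's port tests it
def fitA (note k : Int) : Bool :=
  (([0, 2, 4, 5, 7, 9, 11] : List Int)).contains (PySem.Int.mod (PySem.Int.mod note 12 - k) 12)

lemma fit_eq (note k : Int) (h0 : 0 ≤ k) (h1 : k < 12) : fitB note k = fitA note k := by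
  unfold fitB fitA
  simp only [PySem.Int.mod_eq_emod_of_pos (by norm_num : (0:Int) < 12)]
  rw [Bool.eq_iff_iff]
  simp only [List.contains_iff_mem, List.mem_map, List.mem_cons, List.not_mem_nil, or_false]
  constructor
  · rintro ⟨p, hp, rfl⟩; rcases hp with rfl|rfl|rfl|rfl|rfl|rfl|rfl <;> omega
  · intro h; rcases h with h|h|h|h|h|h|h
    · exact ⟨0, by norm_num, by omega⟩
    · exact ⟨2, by norm_num, by omega⟩
    · exact ⟨4, by norm_num, by omega⟩
    · exact ⟨5, by norm_num, by omega⟩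
    · exact ⟨7, by norm_num, by omega⟩
    · exact ⟨9, by norm_num, by omega⟩
    · exact ⟨11, by norm_num, by omega⟩

lemma any_congr_mem {l : List Int} {f g : Int → Bool} (h : ∀ x ∈ l, f x = g x) :
    l.any f = l.any g := by
  induction l with
  | nil => rfl
  | cons a t ih =>
    simp only [List.any_cons]
    rw [h a (List.mem_cons_self), ih (fun x hx => h x (List.mem_cons_of_mem a hx))]

-- the contains test B's set fits uses is fitB
lemma ofList_contains_fitB (note k : Int) :
    PySem.Set.contains
      (PySem.Set.ofList (([0, 2, 4, 5, 7, 9, 11] : List Int).map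
        (fun p => PySem.Int.mod (note - p) 12))) k = fitB note k := by
  unfold fitB
  show (PySem.Set.ofList (([0, 2, 4, 5, 7, 9, 11] : List Int).map
      (fun p => PySem.Int.mod (note - p) 12))).contains k
    = (([0, 2, 4, 5, 7, 9, 11] : List Int).map (fun p => PySem.Int.mod (note - p) 12)).contains k
  rw [Bool.eq_iff_iff, List.contains_iff_mem]
  change List.contains _ k = true ↔ _
  rw [List.contains_iff_mem]
  exact PySem.Set.mem_ofList _ _

-- loop invariant: on a non-empty candidate set, B's loop decides
-- 'some candidate key fits every remaining note'
lemma isTuneGo_eq (notes : List Int) :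
    ∀ cand : PySem.Set Int, cand ≠ [] →
      isTuneGo cand notes = cand.any (fun k => notes.all (fun note => fitB note k)) := by
  induction notes with
  | nil =>
    intro cand hne
    cases cand with
    | nil => exact absurd rfl hne
    | cons a t => simp [isTuneGo]
  | cons note rest ih =>
    intro cand hne
    show (let fits : PySem.Set Int :=
            PySem.Set.ofList (([0, 2, 4, 5, 7, 9, 11] : List Int).map
              (fun p => PySem.Int.mod (note - p) 12))
          let cand' := PySem.Set.inter cand fits
          if cand'.isEmpty then false else isTuneGo cand' rest) = _
    have hinter : PySem.Set.inter cand
        (PySem.Set.ofList (([0, 2, 4, 5, 7, 9, 11] : List Int).map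
          (fun p => PySem.Int.mod (note - p) 12)))
        = cand.filter (fun k => fitB note k) := by
      show cand.filter _ = cand.filter _
      apply List.filter_congr
      intro k _
      exact ofList_contains_fitB note k
    simp only [hinter]
    by_cases hemp : (cand.filter (fun k => fitB note k)).isEmpty
    · rw [if_pos hemp]
      rw [List.isEmpty_iff, List.filter_eq_nil_iff] at hemp
      symm
      rw [List.any_eq_false]
      intro k hk
      simp [hemp k hk]
    · rw [if_neg hemp]
      rw [ih _ (by simpa [List.isEmpty_iff] using hemp)]
      rw [List.any_filter]
      simp [List.all_cons]

-- the concrete key list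
lemma range12 : PySem.List.pyRange 0 12 1 = [0, 1, 2, 3, 4, 5, 6, 7, 8, 9, 10, 11] := by decide

lemma ofList_range12 :
    PySem.Set.ofList (PySem.List.pyRange 0 12 1) = [0, 1, 2, 3, 4, 5, 6, 7, 8, 9, 10, 11] := by
  decide

-- ===== VERDICT (by name: the statement is the Claim_ definition above) =====
theorem is_tune_spec : Claim_equal_is_tune := by
  intro notes _
  show is_tune notes = is_tune_alt notes
  unfold is_tune is_tune_alt
  by_cases h : notes.isEmpty
  · simp [h]
  · rw [if_neg h, if_neg h]
    rw [ofList_range12, isTuneGo_eq notes _ (by decide), ← range12]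
    apply any_congr_mem
    intro k hk
    have hk' : 0 ≤ k ∧ k < 12 := PySem.List.mem_pyRange_one.mp hk
    apply List.all_congr rfl
    intro note
    rw [fit_eq note k hk'.1 hk'.2]
    rfl
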